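-- pv_equiv track=rewrite | github.com/Yorkre/Trabajo-ProgrAv | codigocasidefinitivo.py | _eval_line_consecutive
-- ===== SOURCE A (Python) =====
-- BASE_PAYOUT = {
--     "BALL": 3,
--     "MEGAPHONE": 2,
--     "BOOT": 5,
--     "SHIRT": 8,
--     "GOAL": 12,
--     "TROPHY": 40,
--     "WILD": 0,
--     "GOLD": 3   # golden ball pays like a ball (but mainly used for free spins)
-- }
--
-- COUNT_MULT = {3: 1, 4: 4, 5: 12}  # multipliers depending on consecutive count
--
-- def _eval_line_consecutive(symbols_line, bet):
--     wild_key = "WILD"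
--     # find first non-wild
--     first_non = None
--     for s in symbols_line:
--         if s != wild_key:
--             first_non = s
--             break
--     # if all wild
--     if first_non is None:
--         cnt = len(symbols_line)
--         if cnt >= 3:
--             return bet * 5, cnt, wild_key
--         return 0, 0, None
--     # count consecutive from left
--     cnt = 0
--     for s in symbols_line:
--         if s == first_non or s == wild_key:
--             cnt += 1
--         else:
--             break
--     if cnt >= 3:
--         base = BASE_PAYOUT.get(first_non, 0)
--         mult = COUNT_MULT.get(cnt, COUNT_MULT[max(COUNT_MULT.keys())])
--         payout = bet * base * mult
--         return payout, cnt, first_non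
--     return 0, 0, None
-- ===== SOURCE B (Python) =====
-- def _eval_line_consecutive(symbols_line, bet):
--     # single recursive pass: track the first non-wild symbol and the run length together
--     def run(rest, sym, cnt):
--         if not rest:
--             return sym, cnt
--         head = rest[0]
--         if sym is None:
--             if head == "WILD":
--                 return run(rest[1:], None, cnt + 1)
--             return run(rest[1:], head, cnt + 1)
--         if head == sym or head == "WILD":
--             return run(rest[1:], sym, cnt + 1)
--         return sym, cnt
--     sym, cnt = run(symbols_line, None, 0)
--     if cnt < 3:
--         return 0, 0, None
--     if sym is None:
--         return bet * 5, cnt, "WILD"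
--     base = {"BALL": 3, "MEGAPHONE": 2, "BOOT": 5, "SHIRT": 8,
--             "GOAL": 12, "TROPHY": 40, "WILD": 0, "GOLD": 3}.get(sym, 0)
--     mult = {3: 1, 4: 4, 5: 12}.get(cnt, 12)
--     return bet * base * mult, cnt, sym
-- ===== Notes on version B (the rewrite author's own statement) =====
-- stated objective: alternative
-- what changed: Replaced A's two sequential scans (find the first non-wild symbol, then re-count the matching prefix) by one recursive pass that tracks the first non-wild symbol and the run length in a single accumulator, followed by one unified payout step.
import Mathlib
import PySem

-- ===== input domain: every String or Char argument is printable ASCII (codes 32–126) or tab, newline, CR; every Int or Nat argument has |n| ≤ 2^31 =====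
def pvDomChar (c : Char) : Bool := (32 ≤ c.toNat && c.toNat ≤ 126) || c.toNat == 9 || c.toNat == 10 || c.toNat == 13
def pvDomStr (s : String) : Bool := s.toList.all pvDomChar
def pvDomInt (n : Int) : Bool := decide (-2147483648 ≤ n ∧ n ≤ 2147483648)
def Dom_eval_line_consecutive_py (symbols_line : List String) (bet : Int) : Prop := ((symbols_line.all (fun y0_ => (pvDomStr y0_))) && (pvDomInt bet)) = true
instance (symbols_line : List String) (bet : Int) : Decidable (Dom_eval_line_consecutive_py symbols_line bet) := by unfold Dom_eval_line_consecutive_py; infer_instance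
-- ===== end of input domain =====

-- B merges A's two sequential scans (find first non-wild, then re-count the prefix) into a
-- single recursive pass tracking (first non-wild, run length) together; objective: alternative.


-- ===== PORT A =====
def pyBasePayout : PySem.Dict String Int :=
  PySem.Dict.ofList [("BALL", 3), ("MEGAPHONE", 2), ("BOOT", 5), ("SHIRT", 8),
                     ("GOAL", 12), ("TROPHY", 40), ("WILD", 0), ("GOLD", 3)]
def pyCountMult : PySem.Dict Int Int := PySem.Dict.ofList [(3, 1), (4, 4), (5, 12)]

-- A's first loop: find the first non-wild symbol (break on first hit)
def pyFirstNon : List String → Option String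
  | [] => none
  | s :: rest => if s ≠ "WILD" then some s else pyFirstNon rest

-- A's second loop: count consecutive matches from the left (break on first mismatch)
def pyCountCons (first_non : String) : List String → Int
  | [] => 0
  | s :: rest => if s = first_non ∨ s = "WILD" then pyCountCons first_non rest + 1 else 0

def eval_line_consecutive_py (symbols_line : List String) (bet : Int) : Int × Int × Option String :=
  let wild_key := "WILD"
  match pyFirstNon symbols_line with
  | none =>
      let cnt : Int := symbols_line.length
      if cnt ≥ 3 then (bet * 5, cnt, some wild_key) else (0, 0, none)
  | some first_non =>
      let cnt := pyCountCons first_non symbols_line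
      if cnt ≥ 3 then
        let base := pyBasePayout.getD first_non 0
        -- COUNT_MULT[max(COUNT_MULT.keys())]: the key is always present, getD's default is unreachable
        let mult := pyCountMult.getD cnt (pyCountMult.getD ((PySem.List.max? pyCountMult.keys (fun k => k)).getD 0) 0)
        (bet * base * mult, cnt, some first_non)
      else (0, 0, none)

-- ===== PORT B =====
def altRun : List String → Option String → Int → Option String × Int
  | [], sym, cnt => (sym, cnt)
  | head :: rest, none, cnt =>
      if head = "WILD" then altRun rest none (cnt + 1)
      else altRun rest (some head) (cnt + 1)
  | head :: rest, some f, cnt =>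
      if head = f ∨ head = "WILD" then altRun rest (some f) (cnt + 1)
      else (some f, cnt)

def altBase : PySem.Dict String Int :=
  PySem.Dict.ofList [("BALL", 3), ("MEGAPHONE", 2), ("BOOT", 5), ("SHIRT", 8),
                     ("GOAL", 12), ("TROPHY", 40), ("WILD", 0), ("GOLD", 3)]
def altMult : PySem.Dict Int Int := PySem.Dict.ofList [(3, 1), (4, 4), (5, 12)]

def eval_line_consecutive_py_alt (symbols_line : List String) (bet : Int) : Int × Int × Option String :=
  let p := altRun symbols_line none 0
  let cnt := p.2
  if cnt < 3 then (0, 0, none)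
  else
    match p.1 with
    | none => (bet * 5, cnt, some "WILD")
    | some s =>
        let base := altBase.getD s 0
        let mult := altMult.getD cnt 12
        (bet * base * mult, cnt, some s)

-- ===== PRECONDITION & SPEC =====
def Spec_eval_line_consecutive_py (symbols_line : List String) (bet : Int) (out : Int × Int × Option String) : Prop := out = eval_line_consecutive_py_alt symbols_line bet
instance (symbols_line : List String) (bet : Int) (out : Int × Int × Option String) : Decidable (Spec_eval_line_consecutive_py symbols_line bet out) := by unfold Spec_eval_line_consecutive_py; infer_instance

-- ===== CLAIM (what is proved, stated in full; the proofs are below) =====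
def Claim_equal_eval_line_consecutive_py : Prop := ∀ (symbols_line : List String) (bet : Int), Dom_eval_line_consecutive_py symbols_line bet → Spec_eval_line_consecutive_py symbols_line bet (eval_line_consecutive_py symbols_line bet)

-- ===== LEMMAS AND PROOFS =====
theorem altRun_some (l : List String) (f : String) (c : Int) :
    altRun l (some f) c = (some f, c + pyCountCons f l) := by
  induction l generalizing c with
  | nil => simp [altRun, pyCountCons]
  | cons head rest ih =>
      simp only [altRun, pyCountCons]
      split_ifs with h
      · rw [ih]; exact Prod.ext rfl (by ring)
      · simp

theorem altRun_none (l : List String) (c : Int) :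
    altRun l none c =
      match pyFirstNon l with
      | none => (none, c + l.length)
      | some f => (some f, c + pyCountCons f l) := by
  induction l generalizing c with
  | nil => simp [altRun, pyFirstNon]
  | cons head rest ih =>
      by_cases h : head = "WILD"
      · subst h
        simp only [altRun, pyFirstNon, ne_eq, not_true_eq_false, if_false, ih]
        cases hf : pyFirstNon rest with
        | none => exact Prod.ext rfl (by simp [List.length_cons]; ring)
        | some f =>
            simp only [pyCountCons, or_true, if_true]
            exact Prod.ext rfl (by ring)
      · simp only [altRun, altRun_some, pyFirstNon, ne_eq, h, not_false_eq_true,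
          if_true, pyCountCons]
        exact Prod.ext rfl (by simp; ring)

-- ===== VERDICT (by name: the statement is the Claim_ definition above) =====
theorem eval_line_consecutive_py_spec : Claim_equal_eval_line_consecutive_py := by
  intro symbols_line bet _
  unfold Spec_eval_line_consecutive_py eval_line_consecutive_py eval_line_consecutive_py_alt
  rw [altRun_none]
  cases hf : pyFirstNon symbols_line with
  | none =>
      simp only [zero_add]
      by_cases h3 : (symbols_line.length : Int) ≥ 3
      · rw [if_pos h3, if_neg (by omega)]
      · rw [if_neg h3, if_pos (by omega)]
  | some f =>
      simp only [zero_add]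
      by_cases h3 : pyCountCons f symbols_line ≥ 3
      · rw [if_pos h3, if_neg (by omega)]
        refine Prod.ext ?_ rfl
        show bet * pyBasePayout.getD f 0 * pyCountMult.getD (pyCountCons f symbols_line)
            (pyCountMult.getD ((PySem.List.max? pyCountMult.keys (fun k => k)).getD 0) 0) =
          bet * altBase.getD f 0 * altMult.getD (pyCountCons f symbols_line) 12
        rfl
      · rw [if_neg h3, if_pos (by omega)]
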